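-- pv_equiv track=rewrite | github.com/Saketh-debug/gp-ultimate-quiz-platform | gen_tc.py | solve_like_cpp
-- ===== SOURCE A (Python) =====
-- def solve_like_cpp(n, h):
--     """
--     Exact translation of your C++ Monotonic Stack logic to compute the right answer
--     """
--     res = 0
--     s = []
--
--     # Left to right pass
--     for i in range(1, n + 1):
--         while s and h[s[-1]] < h[i]:
--             s.pop()
--         if s:
--             res += i - s[-1] + 1
--         s.append(i)
--
--     s = []
--     # Right to left pass
--     for i in range(n, 0, -1):
--         while s and h[s[-1]] < h[i]:
--             s.pop()
--         if s:
--             res += s[-1] - i + 1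
--         s.append(i)
--
--     return res
-- ===== SOURCE B (Python) =====
-- def solve_like_cpp(n, h):
--     """Brute-force nearest >= neighbour scans instead of monotonic stacks."""
--     res = 0
--     for i in range(1, n + 1):
--         for j in range(i - 1, 0, -1):
--             if h[j] >= h[i]:
--                 res += i - j + 1
--                 break
--     for i in range(n, 0, -1):
--         for j in range(i + 1, n + 1):
--             if h[j] >= h[i]:
--                 res += j - i + 1
--                 break
--     return res
-- ===== Notes on version B (the rewrite author's own statement) =====
-- stated objective: simpler
-- what changed: Replaces A's two monotonic-stack passes by direct brute-force scans: for each i, walk left (then right) to the first index with height >= h[i] and add the span; no stack state is maintained.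
import Mathlib
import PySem

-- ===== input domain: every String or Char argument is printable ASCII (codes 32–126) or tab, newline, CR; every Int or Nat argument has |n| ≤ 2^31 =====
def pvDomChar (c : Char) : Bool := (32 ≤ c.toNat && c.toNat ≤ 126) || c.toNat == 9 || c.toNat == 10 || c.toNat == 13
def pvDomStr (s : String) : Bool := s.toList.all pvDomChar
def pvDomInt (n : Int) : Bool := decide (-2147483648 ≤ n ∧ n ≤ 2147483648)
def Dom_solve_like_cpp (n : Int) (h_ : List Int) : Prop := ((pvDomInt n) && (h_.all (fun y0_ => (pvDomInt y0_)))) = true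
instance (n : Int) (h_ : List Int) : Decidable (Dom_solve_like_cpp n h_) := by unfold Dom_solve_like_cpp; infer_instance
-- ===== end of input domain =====

-- B replaces A's two monotonic-stack passes by plain nearest->= neighbour scans (simpler, no stack state); equal return values proved on all non-raising inputs.


-- h[j] (Python indexing; every access made by either program lies in range under Pre_)
def hAt (h_ : List Int) (j : Int) : Int := PySem.List.pyGetD h_ j 0

-- ===== PORT A =====
-- the inner `while s and h[s[-1]] < h[i]: s.pop()` (stack top = list head)
def popA (h_ : List Int) (c : Int) : List Int → List Int
  | [] => []
  | j :: rest => if hAt h_ j < c then popA h_ c rest else j :: rest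

-- one iteration of a pass: pop, add `f i top` if nonempty, push i  (left pass f i j = i-j+1, right pass f i j = j-i+1)
def stepA (h_ : List Int) (f : Int → Int → Int) (st : Int × List Int) (i : Int) : Int × List Int :=
  let s := popA h_ (hAt h_ i) st.2
  match s with
  | [] => (st.1, i :: s)
  | j :: _ => (st.1 + f i j, i :: s)

def solve_like_cpp (n : Int) (h_ : List Int) : Int :=
  let st1 := (PySem.List.pyRange 1 (n + 1) 1).foldl (stepA h_ (fun i j => i - j + 1)) (0, [])
  let st2 := (PySem.List.pyRange n 0 (-1)).foldl (stepA h_ (fun i j => j - i + 1)) (st1.1, [])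
  st2.1

-- ===== PORT B =====
-- `for j in js: if h[j] >= h[i]: res += f i j; break`
def scanB (h_ : List Int) (f : Int → Int → Int) (i : Int) : List Int → Int
  | [] => 0
  | j :: rest => if hAt h_ i ≤ hAt h_ j then f i j else scanB h_ f i rest

def solve_like_cpp_alt (n : Int) (h_ : List Int) : Int :=
  let r1 := (PySem.List.pyRange 1 (n + 1) 1).foldl
    (fun acc i => acc + scanB h_ (fun i j => i - j + 1) i (PySem.List.pyRange (i - 1) 0 (-1))) 0
  (PySem.List.pyRange n 0 (-1)).foldl
    (fun acc i => acc + scanB h_ (fun i j => j - i + 1) i (PySem.List.pyRange (i + 1) (n + 1) 1)) r1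

-- ===== PRECONDITION & SPEC =====
-- Pre_ excludes exactly the inputs where Python A raises IndexError (n ≥ 2 with h too short); B raises there too.
def Pre_solve_like_cpp (n : Int) (h_ : List Int) : Prop := n ≤ 1 ∨ n < (h_.length : Int)
instance (n : Int) (h_ : List Int) : Decidable (Pre_solve_like_cpp n h_) := by unfold Pre_solve_like_cpp; infer_instance
def pvWitness_solve_like_cpp : Int × List Int := (4, [0, 5, 3, 5, 2])

def Spec_solve_like_cpp (n : Int) (h_ : List Int) (out : Int) : Prop := out = solve_like_cpp_alt n h_
instance (n : Int) (h_ : List Int) (out : Int) : Decidable (Spec_solve_like_cpp n h_ out) := by unfold Spec_solve_like_cpp; infer_instance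

-- ===== CLAIM (what is proved, stated in full; the proofs are below) =====
def Claim_equal_solve_like_cpp : Prop := ∀ (n : Int) (h_ : List Int), Dom_solve_like_cpp n h_ → Pre_solve_like_cpp n h_ → Spec_solve_like_cpp n h_ (solve_like_cpp n h_)

-- ===== LEMMAS AND PROOFS =====

-- the running sum described by B, with pr = the already-processed indices, most recent first
def bsum (h_ : List Int) (f : Int → Int → Int) : List Int → List Int → Int
  | _, [] => 0
  | pr, i :: rest =>
      (match pr.find? (fun j => decide (hAt h_ i ≤ hAt h_ j)) with
       | some j => f i j
       | none => 0) + bsum h_ f (i :: pr) rest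

theorem scanB_eq_find (h_ : List Int) (f : Int → Int → Int) (i : Int) (l : List Int) :
    scanB h_ f i l = (match l.find? (fun j => decide (hAt h_ i ≤ hAt h_ j)) with
       | some j => f i j
       | none => 0) := by
  induction l with
  | nil => rfl
  | cons j rest ih =>
      simp only [scanB, List.find?]
      by_cases hj : hAt h_ i ≤ hAt h_ j
      · simp [hj]
      · simp [hj, ih]

theorem popA_popA (h_ : List Int) (c c' : Int) (hcc : c' ≤ c) (s : List Int) :
    popA h_ c (popA h_ c' s) = popA h_ c s := by
  induction s with
  | nil => rfl
  | cons j rest ih =>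
      simp only [popA]
      by_cases hj : hAt h_ j < c'
      · rw [if_pos hj, ih, if_pos (lt_of_lt_of_le hj hcc)]
      · rw [if_neg hj, popA]

-- the monotonic-stack invariant: popping down to height c exposes the nearest processed index with height ≥ c
theorem run_eq (h_ : List Int) (f : Int → Int → Int) :
    ∀ (ord pr : List Int) (res : Int) (s : List Int),
      (∀ c : Int, (popA h_ c s).head? = pr.find? (fun j => decide (c ≤ hAt h_ j))) →
      (ord.foldl (stepA h_ f) (res, s)).1 = res + bsum h_ f pr ord := by
  intro ord
  induction ord with
  | nil => intro pr res s _; simp [bsum]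
  | cons i rest ih =>
      intro pr res s hinv
      have hstep : stepA h_ f (res, s) i =
          (res + (match pr.find? (fun j => decide (hAt h_ i ≤ hAt h_ j)) with
                  | some j => f i j
                  | none => 0), i :: popA h_ (hAt h_ i) s) := by
        have := hinv (hAt h_ i)
        simp only [stepA]
        cases hs : popA h_ (hAt h_ i) s with
        | nil => rw [hs] at this; simp at this; simp [← this]
        | cons j t => rw [hs] at this; simp at this; simp [← this]
      have hinv' : ∀ c : Int, (popA h_ c (i :: popA h_ (hAt h_ i) s)).head? =
          (i :: pr).find? (fun j => decide (c ≤ hAt h_ j)) := by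
        intro c
        by_cases hc : c ≤ hAt h_ i
        · have : ¬ hAt h_ i < c := not_lt.mpr hc
          simp [popA, this, List.find?, hc]
        · have h1 : hAt h_ i < c := lt_of_not_ge hc
          simp only [popA, if_pos h1]
          rw [popA_popA h_ c (hAt h_ i) (le_of_lt h1) s]
          simp [List.find?, hc, hinv c]
      simp only [List.foldl_cons, hstep]
      rw [ih (i :: pr) _ _ hinv']
      simp [bsum]
      ring

-- B's accumulator loop is init + sum of contributions
theorem foldlB_eq (g : Int → Int) :
    ∀ (l : List Int) (init : Int),
      l.foldl (fun acc i => acc + g i) init = init + (l.map g).sum := by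
  intro l
  induction l with
  | nil => simp
  | cons i rest ih => intro init; simp [ih]; ring

-- bsum over a left-to-right pass = B's downward scans
theorem bsum_left (h_ : List Int) (f : Int → Int → Int) (b : Int) :
    ∀ (m : Nat) (a : Int), (b - a).toNat = m → 0 < a →
      bsum h_ f (PySem.List.pyRange (a - 1) 0 (-1)) (PySem.List.pyRange a b 1) =
        ((PySem.List.pyRange a b 1).map
          (fun i => scanB h_ f i (PySem.List.pyRange (i - 1) 0 (-1)))).sum := by
  intro m
  induction m with
  | zero =>
      intro a hm _
      have hba : b ≤ a := by omega
      rw [PySem.List.pyRange_one_eq_nil hba]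
      simp [bsum]
  | succ k ih =>
      intro a hm ha
      have hab : a < b := by omega
      rw [PySem.List.pyRange_one_cons hab]
      simp only [bsum, List.map_cons, List.sum_cons]
      have hpr : (a : Int) :: PySem.List.pyRange (a - 1) 0 (-1) =
          PySem.List.pyRange (a + 1 - 1) 0 (-1) := by
        have : (a + 1 - 1 : Int) = a := by ring
        rw [this, PySem.List.pyRange_neg_one_cons ha]
      rw [hpr, ih (a + 1) (by omega) (by omega), scanB_eq_find]
  -- contribution + recurse with prefix extended

-- bsum over the right-to-left pass = B's upward scans
theorem bsum_right (h_ : List Int) (f : Int → Int → Int) (n : Int) :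
    ∀ (m : Nat) (a : Int), a.toNat = m → a ≤ n →
      bsum h_ f (PySem.List.pyRange (a + 1) (n + 1) 1) (PySem.List.pyRange a 0 (-1)) =
        ((PySem.List.pyRange a 0 (-1)).map
          (fun i => scanB h_ f i (PySem.List.pyRange (i + 1) (n + 1) 1))).sum := by
  intro m
  induction m with
  | zero =>
      intro a hm _
      have ha : a ≤ 0 := by omega
      rw [PySem.List.pyRange_neg_one_eq_nil ha]
      simp [bsum]
  | succ k ih =>
      intro a hm han
      have ha : (0 : Int) < a := by omega
      rw [PySem.List.pyRange_neg_one_cons ha]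
      simp only [bsum, List.map_cons, List.sum_cons]
      have hpr : (a : Int) :: PySem.List.pyRange (a + 1) (n + 1) 1 =
          PySem.List.pyRange (a - 1 + 1) (n + 1) 1 := by
        have : (a - 1 + 1 : Int) = a := by ring
        rw [this]
        exact (PySem.List.pyRange_one_cons (by omega)).symm
      rw [hpr, ih (a - 1) (by omega) (by omega), scanB_eq_find]

theorem inv_nil (h_ : List Int) :
    ∀ c : Int, (popA h_ c ([] : List Int)).head? =
      ([] : List Int).find? (fun j => decide (c ≤ hAt h_ j)) := by
  intro c; rfl

theorem solve_eq (n : Int) (h_ : List Int) : solve_like_cpp n h_ = solve_like_cpp_alt n h_ := by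
  unfold solve_like_cpp solve_like_cpp_alt
  have hL := run_eq h_ (fun i j => i - j + 1) (PySem.List.pyRange 1 (n + 1) 1) [] 0 [] (inv_nil h_)
  have hR := run_eq h_ (fun i j => j - i + 1) (PySem.List.pyRange n 0 (-1)) []
      ((PySem.List.pyRange 1 (n + 1) 1).foldl (stepA h_ (fun i j => i - j + 1)) (0, [])).1 []
      (inv_nil h_)
  simp only []
  rw [hR, hL]
  have e1 : bsum h_ (fun i j => i - j + 1) [] (PySem.List.pyRange 1 (n + 1) 1) =
      ((PySem.List.pyRange 1 (n + 1) 1).map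
        (fun i => scanB h_ (fun i j => i - j + 1) i (PySem.List.pyRange (i - 1) 0 (-1)))).sum := by
    have h0 : ([] : List Int) = PySem.List.pyRange (1 - 1) 0 (-1) := by
      rw [PySem.List.pyRange_neg_one_eq_nil (by omega)]
    rw [h0]
    exact bsum_left h_ _ (n + 1) (n + 1 - 1).toNat 1 rfl (by omega)
  have e2 : bsum h_ (fun i j => j - i + 1) [] (PySem.List.pyRange n 0 (-1)) =
      ((PySem.List.pyRange n 0 (-1)).map
        (fun i => scanB h_ (fun i j => j - i + 1) i (PySem.List.pyRange (i + 1) (n + 1) 1))).sum := by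
    by_cases hn : 0 < n
    · have h0 : ([] : List Int) = PySem.List.pyRange (n + 1) (n + 1) 1 := by
        rw [PySem.List.pyRange_one_eq_nil (by omega)]
      rw [h0]
      exact bsum_right h_ _ n n.toNat n rfl (by omega)
    · rw [PySem.List.pyRange_neg_one_eq_nil (by omega)]
      simp [bsum]
  rw [e1, e2, foldlB_eq, foldlB_eq]

-- ===== VERDICT (by name: the statement is the Claim_ definition above) =====
theorem solve_like_cpp_spec : Claim_equal_solve_like_cpp := by
  intro n h_ _ _
  unfold Spec_solve_like_cpp
  exact solve_eq n h_
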